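-- pv_equiv track=rewrite | github.com/xy-xiaotudou/UECA-G | data_utils_fe_and_emotion.py | get_sina_annotated_ece_targets
-- ===== SOURCE A (Python) =====
-- def get_sina_annotated_ece_targets(sents, emocat_labels, cau_labels):
--     annotated_targets = []
--     num_sents = len(sents)
--     del_list = []
--     for i in range(num_sents):
--         emo_cats = emocat_labels[i]
--         # tup: ([7, 9])
--         if len(emo_cats) == 1:
--             tuples = cau_labels[i]
--             for tup in tuples:
--                 cau_id = tup
--                 sents[i][cau_id - 1] = f"[{emo_cats[0]},{sents[i][cau_id - 1]}]"
--         else: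
--             del_list.append(i)
--         annotated_targets.append(sents[i])
--     for del_id in reversed(del_list):
--         annotated_targets.pop(del_id)
--     return annotated_targets, del_list
-- ===== SOURCE B (Python) =====
-- def get_sina_annotated_ece_targets(sents, emocat_labels, cau_labels):
--     def annotate(sent, emo, cau_ids):
--         for cau_id in cau_ids:
--             sent[cau_id - 1] = f"[{emo},{sent[cau_id - 1]}]"
--         return sent
--
--     n = len(sents)
--     del_list = [i for i in range(n) if len(emocat_labels[i]) != 1]
--     annotated_targets = [annotate(sents[i], emocat_labels[i][0], cau_labels[i])
--                          for i in range(n) if len(emocat_labels[i]) == 1]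
--     return annotated_targets, del_list
-- ===== Notes on version B (the rewrite author's own statement) =====
-- stated objective: simpler
-- what changed: B replaces A's build-all-then-pop structure (append every sentence, record multi-emotion indices, then pop them off the result in a reverse cleanup loop) with two direct comprehensions: del_list as a filter over the indices, and the annotated list built only from single-emotion sentences, so the trailing pop loop disappears.
import Mathlib
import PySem

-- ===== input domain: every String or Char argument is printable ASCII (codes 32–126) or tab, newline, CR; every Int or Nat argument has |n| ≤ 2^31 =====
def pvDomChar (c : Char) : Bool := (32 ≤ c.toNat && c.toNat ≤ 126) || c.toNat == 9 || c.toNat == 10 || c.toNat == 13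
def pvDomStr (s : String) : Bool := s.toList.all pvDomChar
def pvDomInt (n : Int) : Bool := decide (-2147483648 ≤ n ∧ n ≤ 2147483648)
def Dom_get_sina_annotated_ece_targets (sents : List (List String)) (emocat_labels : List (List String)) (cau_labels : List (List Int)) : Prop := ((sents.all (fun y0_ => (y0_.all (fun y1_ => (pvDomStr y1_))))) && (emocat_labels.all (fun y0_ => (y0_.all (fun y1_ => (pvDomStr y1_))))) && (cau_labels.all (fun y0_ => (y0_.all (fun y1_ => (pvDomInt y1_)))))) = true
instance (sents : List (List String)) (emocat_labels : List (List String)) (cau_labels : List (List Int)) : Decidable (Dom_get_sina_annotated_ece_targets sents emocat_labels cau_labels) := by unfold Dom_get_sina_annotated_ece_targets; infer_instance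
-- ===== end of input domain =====

-- B drops A's build-all-then-pop structure: it builds del_list and the annotated list by two direct
-- comprehensions over the indices, so the reverse cleanup-pop loop disappears (objective: simpler).
-- Both Pythons mutate the single-emotion sentence lists of `sents` in place identically on Pre_;
-- the theorems below are about the return value.

-- ===== PORT A =====

-- list.pop(k): total form; in A every popped index is a nonnegative in-range position (proved below),
-- so the else-branch is unreachable there.
def pyPop {α : Type} (l : List α) (k : Int) : List α :=
  if 0 ≤ k ∧ k < l.length then l.eraseIdx k.toNat else l

-- body of A's main loop; state = (annotated_targets, sents, del_list)
def pvStepA (emocat_labels : List (List String)) (cau_labels : List (List Int))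
    (st : List (List String) × List (List String) × List Int) (i : Nat) :
    List (List String) × List (List String) × List Int :=
  let annotated_targets := st.1
  let s := st.2.1
  let del_list := st.2.2
  let emo_cats := emocat_labels.getD i []
  if emo_cats.length == 1 then
    let tuples := cau_labels.getD i []
    let sent := tuples.foldl
      (fun sent tup =>
        PySem.List.pySetD sent (tup - 1)
          ("[" ++ emo_cats.getD 0 "" ++ "," ++ PySem.List.pyGetD sent (tup - 1) "" ++ "]"))
      (s.getD i [])
    (annotated_targets ++ [sent], s.set i sent, del_list)
  else
    (annotated_targets ++ [s.getD i []], s, del_list ++ [(i : Int)])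

def get_sina_annotated_ece_targets (sents : List (List String)) (emocat_labels : List (List String)) (cau_labels : List (List Int)) : List (List String) × List Int :=
  let num_sents := sents.length
  let st := (List.range num_sents).foldl (pvStepA emocat_labels cau_labels) ([], sents, [])
  let annotated_targets := (st.2.2.reverse).foldl (fun acc del_id => pyPop acc del_id) st.1
  (annotated_targets, st.2.2)

-- ===== PORT B =====

-- B's helper `annotate(sent, emo, cau_ids)`
def pvAnnotate (sent : List String) (emo : String) (cau_ids : List Int) : List String :=
  cau_ids.foldl
    (fun sent cau_id =>
      PySem.List.pySetD sent (cau_id - 1)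
        ("[" ++ emo ++ "," ++ PySem.List.pyGetD sent (cau_id - 1) "" ++ "]"))
    sent

def get_sina_annotated_ece_targets_alt (sents : List (List String)) (emocat_labels : List (List String)) (cau_labels : List (List Int)) : List (List String) × List Int :=
  let n := sents.length
  let del_list := ((List.range n).filter (fun i => !((emocat_labels.getD i []).length == 1))).map (fun i => Int.ofNat i)
  let annotated_targets := ((List.range n).filter (fun i => (emocat_labels.getD i []).length == 1)).map
    (fun i => pvAnnotate (sents.getD i []) ((emocat_labels.getD i []).getD 0 "") (cau_labels.getD i []))
  (annotated_targets, del_list)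

-- ===== PRECONDITION & SPEC =====
-- Pre_ excludes exactly the inputs where Python A raises an IndexError: a sentence index with no
-- emotion-category entry, a single-emotion sentence with no cause-label entry, or a cause id whose
-- Python index cau_id-1 is out of range for that sentence.
def Pre_get_sina_annotated_ece_targets (sents : List (List String)) (emocat_labels : List (List String)) (cau_labels : List (List Int)) : Prop :=
  ∀ i, i < sents.length →
    i < emocat_labels.length ∧
    ((emocat_labels.getD i []).length = 1 →
      i < cau_labels.length ∧
      ∀ t ∈ cau_labels.getD i [], PySem.Raise.InRange (sents.getD i []).length (t - 1))
instance (sents : List (List String)) (emocat_labels : List (List String)) (cau_labels : List (List Int)) : Decidable (Pre_get_sina_annotated_ece_targets sents emocat_labels cau_labels) := by unfold Pre_get_sina_annotated_ece_targets; infer_instance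

def pvWitness_get_sina_annotated_ece_targets : List (List String) × List (List String) × List (List Int) :=
  ([["a", "b"], ["c"]], [["joy"], ["x", "y"]], [[1, 2], []])

def Spec_get_sina_annotated_ece_targets (sents : List (List String)) (emocat_labels : List (List String)) (cau_labels : List (List Int)) (out : List (List String) × List Int) : Prop := out = get_sina_annotated_ece_targets_alt sents emocat_labels cau_labels
instance (sents : List (List String)) (emocat_labels : List (List String)) (cau_labels : List (List Int)) (out : List (List String) × List Int) : Decidable (Spec_get_sina_annotated_ece_targets sents emocat_labels cau_labels out) := by unfold Spec_get_sina_annotated_ece_targets; infer_instance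

-- ===== CLAIM (what is proved, stated in full; the proofs are below) =====
def Claim_equal_get_sina_annotated_ece_targets : Prop := ∀ (sents : List (List String)) (emocat_labels : List (List String)) (cau_labels : List (List Int)), Dom_get_sina_annotated_ece_targets sents emocat_labels cau_labels → Pre_get_sina_annotated_ece_targets sents emocat_labels cau_labels → Spec_get_sina_annotated_ece_targets sents emocat_labels cau_labels (get_sina_annotated_ece_targets sents emocat_labels cau_labels)

-- ===== LEMMAS AND PROOFS =====

-- the value A/B record for index i when it is kept (single emotion category)
def pvAnnF (sents : List (List String)) (emocat_labels : List (List String)) (cau_labels : List (List Int)) (i : Nat) : List String :=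
  pvAnnotate (sents.getD i []) ((emocat_labels.getD i []).getD 0 "") (cau_labels.getD i [])

-- the value A appends to annotated_targets at index i (kept or not)
def pvProcF (sents : List (List String)) (emocat_labels : List (List String)) (cau_labels : List (List Int)) (i : Nat) : List String :=
  if (emocat_labels.getD i []).length == 1 then pvAnnF sents emocat_labels cau_labels i else sents.getD i []

lemma pvLoopA_char (sents emocat_labels : List (List String)) (cau_labels : List (List Int)) :
    ∀ (m k : Nat) (tA s : List (List String)) (dA : List Int),
      (∀ j, k ≤ j → s.getD j [] = sents.getD j []) →
      ((List.range' k m).foldl (pvStepA emocat_labels cau_labels) (tA, s, dA)).1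
          = tA ++ (List.range' k m).map (pvProcF sents emocat_labels cau_labels) ∧
      ((List.range' k m).foldl (pvStepA emocat_labels cau_labels) (tA, s, dA)).2.2
          = dA ++ ((List.range' k m).filter (fun i => !((emocat_labels.getD i []).length == 1))).map (fun i => Int.ofNat i) := by
  intro m
  induction m with
  | zero => intro k tA s dA _; simp
  | succ m ih =>
    intro k tA s dA hs
    rw [List.range'_succ]
    have hsk : s[k]?.getD [] = sents[k]?.getD [] := by
      have := hs k le_rfl; simpa [List.getD_eq_getElem?_getD] using this
    by_cases h : (emocat_labels[k]?.getD []).length = 1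
    · have hstep : pvStepA emocat_labels cau_labels (tA, s, dA) k
          = (tA ++ [pvAnnF sents emocat_labels cau_labels k],
             s.set k (pvAnnF sents emocat_labels cau_labels k), dA) := by
        simp [pvStepA, pvAnnF, pvAnnotate, List.getD_eq_getElem?_getD, h, hsk]
      have hs' : ∀ j, k + 1 ≤ j →
          (s.set k (pvAnnF sents emocat_labels cau_labels k)).getD j [] = sents.getD j [] := by
        intro j hj
        rw [List.getD_eq_getElem?_getD, List.getElem?_set_ne (by omega), ← List.getD_eq_getElem?_getD]
        exact hs j (by omega)
      have := ih (k + 1) (tA ++ [pvAnnF sents emocat_labels cau_labels k])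
        (s.set k (pvAnnF sents emocat_labels cau_labels k)) dA hs'
      simp only [List.foldl_cons, hstep]
      refine ⟨?_, ?_⟩
      · rw [this.1]; simp [pvProcF, List.getD_eq_getElem?_getD, h]
      · rw [this.2]; simp [List.getD_eq_getElem?_getD, h]
    · have hstep : pvStepA emocat_labels cau_labels (tA, s, dA) k
          = (tA ++ [sents.getD k []], s, dA ++ [(k : Int)]) := by
        simp [pvStepA, List.getD_eq_getElem?_getD, h, hsk]
      have := ih (k + 1) (tA ++ [sents.getD k []]) s (dA ++ [(k : Int)])
        (fun j hj => hs j (by omega))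
      simp only [List.foldl_cons, hstep]
      refine ⟨?_, ?_⟩
      · rw [this.1]; simp [pvProcF, List.getD_eq_getElem?_getD, h]
      · rw [this.2]; simp [List.getD_eq_getElem?_getD, h]

lemma pvPop_at_length {α : Type} (acc : List α) (x : α) (ys : List α) :
    pyPop (acc ++ x :: ys) (Int.ofNat acc.length) = acc ++ ys := by
  unfold pyPop
  split_ifs with hc
  · rw [show (Int.ofNat acc.length).toNat = acc.length from rfl,
      List.eraseIdx_append_of_length_le (le_refl acc.length)]
    simp
  · exfalso
    apply hc
    refine ⟨Int.natCast_nonneg _, ?_⟩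
    show (acc.length : Int) < ((acc ++ x :: ys).length : Int)
    simp only [List.length_append, List.length_cons]
    push_cast
    omega

lemma pvPopAll_filter {α : Type} (q : Nat → Bool) (f : Nat → α) :
    ∀ (m k : Nat) (acc : List α), acc.length = k →
      (((List.range' k m).filter (fun i => !q i)).map (fun i => Int.ofNat i)).foldr
          (fun d a => pyPop a d) (acc ++ (List.range' k m).map f)
        = acc ++ ((List.range' k m).filter q).map f := by
  intro m
  induction m with
  | zero => intro k acc _; simp
  | succ m ih =>
    intro k acc hk
    rw [List.range'_succ]
    by_cases hq : q k
    · have := ih (k + 1) (acc ++ [f k]) (by simp [hk])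
      simp only [List.filter_cons, List.map_cons, hq, Bool.not_true,
        Bool.false_eq_true, if_false, if_true] at this ⊢
      simpa using this
    · have := ih (k + 1) (acc ++ [f k]) (by simp [hk])
      simp only [List.filter_cons, List.map_cons, hq, Bool.not_false, List.foldr_cons,
        Bool.false_eq_true, if_false, if_true] at this ⊢
      rw [show acc ++ f k :: (List.range' (k+1) m).map f
            = (acc ++ [f k]) ++ (List.range' (k+1) m).map f by simp, this]
      rw [show (acc ++ [f k]) ++ ((List.range' (k+1) m).filter q).map f
            = acc ++ f k :: ((List.range' (k+1) m).filter q).map f by simp]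
      rw [← hk, pvPop_at_length]

-- ===== VERDICT (by name: the statement is the Claim_ definition above) =====
theorem get_sina_annotated_ece_targets_spec : Claim_equal_get_sina_annotated_ece_targets := by
  intro sents emocat_labels cau_labels _ _
  unfold Spec_get_sina_annotated_ece_targets
  obtain ⟨h1, h2⟩ := pvLoopA_char sents emocat_labels cau_labels sents.length 0 [] sents []
    (fun j _ => rfl)
  have hpop := pvPopAll_filter (fun i => ((emocat_labels.getD i []).length == 1))
    (pvProcF sents emocat_labels cau_labels) sents.length 0 [] rfl
  simp only [get_sina_annotated_ece_targets, get_sina_annotated_ece_targets_alt,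
    List.range_eq_range']
  rw [h1, h2]
  simp only [List.nil_append] at hpop ⊢
  rw [List.foldl_reverse, hpop]
  refine Prod.ext ?_ rfl
  simp only
  apply List.map_congr_left
  intro i hi
  have hok := List.of_mem_filter hi
  simp only [beq_iff_eq, List.getD_eq_getElem?_getD] at hok
  simp [pvProcF, pvAnnF, pvAnnotate, List.getD_eq_getElem?_getD, hok]
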